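-- pv_equiv track=rewrite | github.com/Jlei61/HFOsp | scripts/audit_gpu_npz.py | _match_bipolar_focus_rel
-- ===== SOURCE A (Python) =====
-- from typing import Any, Dict, List, Set, Tuple
--
-- def _normalize_channel_name(name: str) -> str:
--     """Strip whitespace, uppercase, remove known prefixes."""
--     s = name.strip().upper()
--     for prefix in ("EEG ", "EEG_"):
--         if s.startswith(prefix):
--             s = s[len(prefix):]
--     return s
--
-- def _match_bipolar_focus_rel(
--     ch_name: str, focus_rel: Dict[str, List[str]]
-- ) -> str:
--     """Match bipolar channel to Epilepsiae i/l/e: priority i > l > e."""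
--     normalized = _normalize_channel_name(ch_name)
--     parts = [p.strip() for p in normalized.split("-")]
--     for label in ("i", "l", "e"):
--         label_set = {_normalize_channel_name(c) for c in focus_rel.get(label, [])}
--         for p in parts:
--             if p in label_set:
--                 return label
--     return "unknown"
-- ===== SOURCE B (Python) =====
-- def _normalize_channel_name(name):
--     """Strip whitespace, uppercase, remove known prefixes."""
--     s = name.strip().upper()
--     if s.startswith("EEG "):
--         s = s[4:]
--     if s.startswith("EEG_"):
--         s = s[4:]
--     return s
--
-- def _match_bipolar_focus_rel(ch_name, focus_rel):
--     """Match bipolar channel to Epilepsiae i/l/e: priority i > l > e.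
--
--     Builds one channel->label index (low-priority labels first, so higher
--     priority overwrites), then takes the best-ranked label over the parts.
--     """
--     index = {}
--     for lbl in ("e", "l", "i"):
--         for c in focus_rel.get(lbl, []):
--             index[_normalize_channel_name(c)] = lbl
--     rank = {"i": 0, "l": 1, "e": 2}
--     best = None
--     for p in _normalize_channel_name(ch_name).split("-"):
--         lbl = index.get(p.strip())
--         if lbl is not None and (best is None or rank[lbl] < rank[best]):
--             best = lbl
--     return best if best is not None else "unknown"
-- ===== Notes on version B (the rewrite author's own statement) =====
-- stated objective: alternative
-- what changed: Replaces A's per-label set building and rescanning of the parts with a single normalized-channel-to-best-label dict (populated in reverse priority order so higher-priority labels overwrite) followed by one rank-minimizing pass over the parts; it trades the label-major double scan for an index build plus one lookup pass.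
import Mathlib
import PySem

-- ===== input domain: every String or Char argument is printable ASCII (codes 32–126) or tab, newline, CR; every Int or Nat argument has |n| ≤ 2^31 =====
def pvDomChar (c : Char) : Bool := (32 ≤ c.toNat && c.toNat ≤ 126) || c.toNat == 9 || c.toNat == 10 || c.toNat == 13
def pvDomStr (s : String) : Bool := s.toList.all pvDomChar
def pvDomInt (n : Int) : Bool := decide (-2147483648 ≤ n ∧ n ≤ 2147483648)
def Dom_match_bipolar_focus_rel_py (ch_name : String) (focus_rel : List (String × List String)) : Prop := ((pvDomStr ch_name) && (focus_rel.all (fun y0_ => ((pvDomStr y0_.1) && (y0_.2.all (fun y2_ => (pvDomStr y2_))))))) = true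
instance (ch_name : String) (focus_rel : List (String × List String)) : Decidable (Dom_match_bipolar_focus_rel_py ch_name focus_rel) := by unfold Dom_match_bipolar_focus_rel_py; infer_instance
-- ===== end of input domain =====

-- B builds one normalized-channel → best-label index and takes the best-ranked
-- label over the parts, instead of A's per-label set building and scanning (objective: alternative decomposition, same cost).

-- ===== PORT A =====
def pvNormA (name : String) : String :=
  ["EEG ", "EEG_"].foldl
    (fun s p => if PySem.Str.startswith s p then PySem.Str.slice s (some (PySem.Str.len p)) none else s)
    (PySem.Str.upper (PySem.Str.strip name))

def pvMatchLoopA (parts : List String) (focus_rel : List (String × List String)) : List String → String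
  | [] => "unknown"
  | lbl :: rest =>
    let labelSet : PySem.Set String :=
      PySem.Set.ofList (((PySem.Dict.mk focus_rel).getD lbl []).map pvNormA)
    if parts.any (fun p => PySem.Set.contains labelSet p) then lbl
    else pvMatchLoopA parts focus_rel rest

def match_bipolar_focus_rel_py (ch_name : String) (focus_rel : List (String × List String)) : String :=
  let normalized := pvNormA ch_name
  let parts := ((PySem.Str.split? normalized "-").getD []).map PySem.Str.strip
  pvMatchLoopA parts focus_rel ["i", "l", "e"]

-- ===== PORT B =====
def pvNormB (name : String) : String :=
  let s0 := PySem.Str.upper (PySem.Str.strip name)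
  let s1 := if PySem.Str.startswith s0 "EEG " then PySem.Str.slice s0 (some 4) none else s0
  if PySem.Str.startswith s1 "EEG_" then PySem.Str.slice s1 (some 4) none else s1

def pvIndexB (focus_rel : List (String × List String)) : PySem.Dict String String :=
  ["e", "l", "i"].foldl
    (fun idx lbl => ((PySem.Dict.mk focus_rel).getD lbl []).foldl (fun idx c => idx.insert (pvNormB c) lbl) idx)
    PySem.Dict.empty

-- rank["i"]=0, rank["l"]=1, rank["e"]=2; in Python rank[lbl] is only reached for
-- those three keys, so the total getD stand-in is exact there.
def pvRankB (lbl : String) : Int :=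
  (PySem.Dict.mk [("i", (0 : Int)), ("l", 1), ("e", 2)]).getD lbl 0

def pvStepB (index : PySem.Dict String String) (best : Option String) (p : String) : Option String :=
  match index.get? (PySem.Str.strip p) with
  | none => best
  | some lbl =>
    match best with
    | none => some lbl
    | some b => if pvRankB lbl < pvRankB b then some lbl else best

def match_bipolar_focus_rel_py_alt (ch_name : String) (focus_rel : List (String × List String)) : String :=
  let index := pvIndexB focus_rel
  let best : Option String := ((PySem.Str.split? (pvNormB ch_name) "-").getD []).foldl (pvStepB index) none
  best.getD "unknown"

-- ===== PRECONDITION & SPEC =====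
def Spec_match_bipolar_focus_rel_py (ch_name : String) (focus_rel : List (String × List String)) (out : String) : Prop := out = match_bipolar_focus_rel_py_alt ch_name focus_rel
instance (ch_name : String) (focus_rel : List (String × List String)) (out : String) : Decidable (Spec_match_bipolar_focus_rel_py ch_name focus_rel out) := by unfold Spec_match_bipolar_focus_rel_py; infer_instance

-- ===== CLAIM (what is proved, stated in full; the proofs are below) =====
def Claim_equal_match_bipolar_focus_rel_py : Prop := ∀ (ch_name : String) (focus_rel : List (String × List String)), Dom_match_bipolar_focus_rel_py ch_name focus_rel → Spec_match_bipolar_focus_rel_py ch_name focus_rel (match_bipolar_focus_rel_py ch_name focus_rel)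

-- ===== LEMMAS AND PROOFS =====

-- the two normalizations coincide
theorem pvNorm_eq (n : String) : pvNormA n = pvNormB n := by
  have h1 : PySem.Str.len "EEG " = 4 := by decide
  have h2 : PySem.Str.len "EEG_" = 4 := by decide
  simp only [pvNormA, pvNormB, List.foldl, h1, h2]

-- the normalized members of focus_rel[lbl]
def pvMapn (focus_rel : List (String × List String)) (lbl : String) : List String :=
  ((PySem.Dict.mk focus_rel).getD lbl []).map pvNormB

theorem get?_foldl_insert_const (l : List String) (f : String → String) (v : String)
    (d : PySem.Dict String String) (x : String) :
    (l.foldl (fun d c => d.insert (f c) v) d).get? x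
      = if x ∈ l.map f then some v else d.get? x := by
  induction l generalizing d with
  | nil => simp
  | cons a t ih =>
    simp only [List.foldl_cons, ih, List.map_cons, List.mem_cons, PySem.Dict.get?_insert]
    by_cases h1 : x ∈ t.map f <;> by_cases h2 : x = f a <;> simp [h1, h2]

theorem pvLook_eq (fr : List (String × List String)) (x : String) :
    (pvIndexB fr).get? x
      = if x ∈ pvMapn fr "i" then some "i"
        else if x ∈ pvMapn fr "l" then some "l"
        else if x ∈ pvMapn fr "e" then some "e"
        else none := by
  simp only [pvIndexB, List.foldl_cons, List.foldl_nil, get?_foldl_insert_const,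
    PySem.Dict.get?_empty, pvMapn]
  rfl

-- priority order on the possible lookup results: i < l < e < absent
def pvOrd : Option String → Nat
  | some "i" => 0
  | some "l" => 1
  | some "e" => 2
  | _ => 3

def pvCanon (o : Option String) : Prop :=
  o = none ∨ o = some "i" ∨ o = some "l" ∨ o = some "e"

theorem pvCanon_look (fr : List (String × List String)) (x : String) :
    pvCanon ((pvIndexB fr).get? x) := by
  rw [pvLook_eq]; unfold pvCanon; split_ifs <;> simp

theorem pvCanon_ext {x y : Option String} (hx : pvCanon x) (hy : pvCanon y)
    (h : pvOrd x = pvOrd y) : x = y := by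
  rcases hx with hx | hx | hx | hx <;> rcases hy with hy | hy | hy | hy <;>
    subst hx <;> subst hy <;> simp_all [pvOrd]

-- the best label over a list of (already stripped) parts, as a right fold
def pvBestFrom (fr : List (String × List String)) : List String → Option String
  | [] => none
  | p :: rest =>
    let r := pvBestFrom fr rest
    let l := (pvIndexB fr).get? p
    if pvOrd l < pvOrd r then l else r

theorem pvCanon_bestFrom (fr : List (String × List String)) (L : List String) :
    pvCanon (pvBestFrom fr L) := by
  induction L with
  | nil => left; rfl
  | cons p rest ih =>
    simp only [pvBestFrom]
    split_ifs
    · exact pvCanon_look fr p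
    · exact ih

theorem pvStepB_eq (fr : List (String × List String)) (b : Option String) (p : String)
    (hb : pvCanon b) :
    pvStepB (pvIndexB fr) b p
      = (let l := (pvIndexB fr).get? (PySem.Str.strip p);
         if pvOrd l < pvOrd b then l else b) := by
  have hl := pvCanon_look fr (PySem.Str.strip p)
  rcases hl with hl | hl | hl | hl <;>
    rcases hb with hb | hb | hb | hb <;>
      subst hb <;> simp [pvStepB, hl, pvOrd, pvRankB, PySem.Dict.getD] <;> decide

theorem pvOrd_step (fr : List (String × List String)) (b : Option String) (p : String)
    (hb : pvCanon b) :
    pvOrd (pvStepB (pvIndexB fr) b p)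
      = min (pvOrd ((pvIndexB fr).get? (PySem.Str.strip p))) (pvOrd b) := by
  rw [pvStepB_eq fr b p hb]
  simp only []
  split_ifs with h <;> omega

theorem pvCanon_step (fr : List (String × List String)) (b : Option String) (p : String)
    (hb : pvCanon b) : pvCanon (pvStepB (pvIndexB fr) b p) := by
  rw [pvStepB_eq fr b p hb]
  simp only []
  split_ifs
  · exact pvCanon_look fr _
  · exact hb

theorem pvOrd_foldl (fr : List (String × List String)) (L : List String) (b : Option String)
    (hb : pvCanon b) :
    pvCanon (L.foldl (pvStepB (pvIndexB fr)) b) ∧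
    pvOrd (L.foldl (pvStepB (pvIndexB fr)) b)
      = min (pvOrd b) (pvOrd (pvBestFrom fr (L.map PySem.Str.strip))) := by
  induction L generalizing b with
  | nil =>
    refine ⟨hb, ?_⟩
    rcases hb with h | h | h | h <;> subst h <;> simp [pvBestFrom, pvOrd]
  | cons p rest ih =>
    obtain ⟨hc, ho⟩ := ih (pvStepB (pvIndexB fr) b p) (pvCanon_step fr b p hb)
    refine ⟨hc, ?_⟩
    simp only [List.foldl_cons, List.map_cons, pvBestFrom] at *
    rw [ho, pvOrd_step fr b p hb]
    split_ifs with h <;> omega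

-- B's result over parts equals the best label, with "unknown" for none
theorem pvB_eq_bestFrom (fr : List (String × List String)) (L : List String) :
    (L.foldl (pvStepB (pvIndexB fr)) none).getD "unknown"
      = (pvBestFrom fr (L.map PySem.Str.strip)).getD "unknown" := by
  obtain ⟨hc, ho⟩ := pvOrd_foldl fr L none (Or.inl rfl)
  have hbf := pvCanon_bestFrom fr (L.map PySem.Str.strip)
  have : L.foldl (pvStepB (pvIndexB fr)) none = pvBestFrom fr (L.map PySem.Str.strip) := by
    apply pvCanon_ext hc hbf
    rw [ho]
    have h3 : pvOrd (none : Option String) = 3 := rfl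
    have : pvOrd (pvBestFrom fr (L.map PySem.Str.strip)) ≤ 3 := by
      rcases hbf with h | h | h | h <;> rw [h] <;> simp [pvOrd]
    omega
  rw [this]

-- bestFrom in terms of membership, matching A's scan structure
theorem pvBestFrom_spec (fr : List (String × List String)) (L : List String) :
    pvBestFrom fr L
      = if L.any (fun p => p ∈ pvMapn fr "i") then some "i"
        else if L.any (fun p => p ∈ pvMapn fr "l") then some "l"
        else if L.any (fun p => p ∈ pvMapn fr "e") then some "e"
        else none := by
  induction L with
  | nil => simp [pvBestFrom]
  | cons p rest ih =>
    simp only [pvBestFrom, ih, pvLook_eq, List.any_cons]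
    by_cases h1 : p ∈ pvMapn fr "i" <;>
      by_cases h2 : p ∈ pvMapn fr "l" <;>
        by_cases h3 : p ∈ pvMapn fr "e" <;>
          by_cases r1 : rest.any (fun p => p ∈ pvMapn fr "i") = true <;>
            by_cases r2 : rest.any (fun p => p ∈ pvMapn fr "l") = true <;>
              by_cases r3 : rest.any (fun p => p ∈ pvMapn fr "e") = true <;>
                simp [h1, h2, h3, r1, r2, r3, pvOrd]

theorem pvContains_ofList (l : List String) (p : String) :
    PySem.Set.contains (PySem.Set.ofList l) p = decide (p ∈ l) := by
  simp [PySem.Set.mem_ofList]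

-- A's label loop in the same membership form
theorem pvA_loop_spec (fr : List (String × List String)) (L : List String) :
    pvMatchLoopA L fr ["i", "l", "e"]
      = if L.any (fun p => p ∈ pvMapn fr "i") then "i"
        else if L.any (fun p => p ∈ pvMapn fr "l") then "l"
        else if L.any (fun p => p ∈ pvMapn fr "e") then "e"
        else "unknown" := by
  have hN : pvNormA = pvNormB := funext pvNorm_eq
  simp only [pvMatchLoopA, pvMapn, hN, pvContains_ofList]
  rfl

-- ===== VERDICT (by name: the statement is the Claim_ definition above) =====
theorem match_bipolar_focus_rel_py_spec : Claim_equal_match_bipolar_focus_rel_py := by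
  intro ch fr _
  unfold Spec_match_bipolar_focus_rel_py
  unfold match_bipolar_focus_rel_py match_bipolar_focus_rel_py_alt
  simp only [pvNorm_eq]
  rw [pvB_eq_bestFrom, pvBestFrom_spec, pvA_loop_spec]
  split_ifs <;> simp
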